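-- pv_equiv track=rewrite | github.com/reolus/Sariel | sariel/ingest/normalize.py | expand_vlan_list
-- ===== SOURCE A (Python) =====
-- def expand_vlan_list(value: str | None) -> list[int]:
--     """Expand VLAN expressions like '10,20,30-32' into sorted integers."""
--     if not value:
--         return []
--
--     cleaned = (
--         value.lower()
--         .replace("add", "")
--         .replace("vlan", "")
--         .replace("allowed", "")
--         .replace(" ", "")
--     )
--
--     if cleaned in {"all", "none"}:
--         return []
--
--     vlans: set[int] = set()
--     for part in cleaned.split(","):
--         if not part:
--             continue
--         if "-" in part:
--             start_text, end_text = part.split("-", 1)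
--             if start_text.isdigit() and end_text.isdigit():
--                 start, end = int(start_text), int(end_text)
--                 if 1 <= start <= end <= 4094:
--                     vlans.update(range(start, end + 1))
--         elif part.isdigit():
--             vlan = int(part)
--             if 1 <= vlan <= 4094:
--                 vlans.add(vlan)
--
--     return sorted(vlans)
-- ===== SOURCE B (Python) =====
-- def expand_vlan_list(value):
--     """Expand VLAN expressions like '10,20,30-32' into sorted integers.
--
--     Interval sweep instead of set-and-sort: each token is parsed into a
--     (lo, hi) interval, the intervals are sorted by their start, and one
--     merging sweep emits the union in increasing order (a `last` watermark
--     skips overlaps), so no per-id set and no sort of the expanded values.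
--     """
--     if not value:
--         return []
--
--     cleaned = (
--         value.lower()
--         .replace("add", "")
--         .replace("vlan", "")
--         .replace("allowed", "")
--         .replace(" ", "")
--     )
--
--     if cleaned in ("all", "none"):
--         return []
--
--     intervals = []
--     for part in cleaned.split(","):
--         if "-" in part:
--             lo_text, hi_text = part.split("-", 1)
--         else:
--             lo_text = hi_text = part
--         if lo_text.isdigit() and hi_text.isdigit():
--             lo, hi = int(lo_text), int(hi_text)
--             if 1 <= lo <= hi <= 4094:
--                 intervals.append((lo, hi))
--
--     intervals.sort(key=lambda p: p[0])
--
--     result = []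
--     last = 0
--     for lo, hi in intervals:
--         start = lo if lo > last else last + 1
--         result.extend(range(start, hi + 1))
--         if hi > last:
--             last = hi
--     return result
-- ===== Notes on version B (the rewrite author's own statement) =====
-- stated objective: alternative
-- what changed: A collects every individual VLAN id into a set and comparison-sorts it; B never materialises the id set: it parses each token into a (lo, hi) interval, sorts only the intervals by start, and one merging sweep with a watermark of the highest id emitted so far writes the union out already in increasing, duplicate-free order.
import Mathlib
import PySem

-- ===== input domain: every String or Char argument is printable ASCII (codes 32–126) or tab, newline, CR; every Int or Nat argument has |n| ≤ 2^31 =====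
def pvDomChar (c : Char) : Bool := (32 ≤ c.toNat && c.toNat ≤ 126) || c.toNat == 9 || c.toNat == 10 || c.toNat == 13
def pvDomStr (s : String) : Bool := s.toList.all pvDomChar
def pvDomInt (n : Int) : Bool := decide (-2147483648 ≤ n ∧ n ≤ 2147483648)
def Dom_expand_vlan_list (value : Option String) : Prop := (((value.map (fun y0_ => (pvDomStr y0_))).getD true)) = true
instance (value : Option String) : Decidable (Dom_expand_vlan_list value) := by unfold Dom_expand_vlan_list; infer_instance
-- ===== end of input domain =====

-- B replaces A's element set + final comparison sort by an interval parse,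
-- a sort of the (few) intervals by start, and one merging sweep that emits
-- the union in increasing order without sorting the expanded values.


-- ===== PORT A =====
-- loop body of A's 'for part in cleaned.split(","):'
def pvStepA (vlans : PySem.Set Int) (part : List Char) : PySem.Set Int :=
  if part = [] then vlans
  else if PySem.Chars.isIn ['-'] part then
    match PySem.Chars.splitOnMax part ['-'] 1 with
    | [startText, endText] =>
      if PySem.Chars.strIsdigit startText && PySem.Chars.strIsdigit endText then
        (match PySem.Int.ofChars? startText, PySem.Int.ofChars? endText with
        | some s, some e =>
          if 1 ≤ s ∧ s ≤ e ∧ e ≤ 4094 then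
            PySem.Set.update vlans (PySem.List.pyRange s (e + 1))
          else vlans
        | _, _ => vlans)  -- unreachable: isdigit strings parse as int
      else vlans
    | _ => vlans  -- unreachable: split(sep, 1) with sep present yields two pieces
  else if PySem.Chars.strIsdigit part then
    match PySem.Int.ofChars? part with
    | some vlan => if 1 ≤ vlan ∧ vlan ≤ 4094 then PySem.Set.add vlans vlan else vlans
    | none => vlans  -- unreachable: isdigit strings parse as int
  else vlans

def expand_vlan_list (value : Option String) : List Int :=
  match value with
  | none => []
  | some v =>
    if v.toList = [] then []
    else
      let cleaned := PySem.Chars.replace (PySem.Chars.replace (PySem.Chars.replace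
        (PySem.Chars.replace (PySem.Chars.lower v.toList)
          "add".toList []) "vlan".toList []) "allowed".toList []) " ".toList []
      if cleaned = "all".toList ∨ cleaned = "none".toList then []
      else
        PySem.List.sorted
          ((PySem.Chars.splitOn cleaned [',']).foldl pvStepA PySem.Set.empty)
          (fun x => x)

-- ===== PORT B =====
-- loop body of B's 'for part in cleaned.split(","):' (collects (lo, hi) intervals)
def pvStepB (intervals : List (Int × Int)) (part : List Char) : List (Int × Int) :=
  let pq : List Char × List Char :=
    if PySem.Chars.isIn ['-'] part then
      match PySem.Chars.splitOnMax part ['-'] 1 with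
      | [loText, hiText] => (loText, hiText)
      | _ => (part, part)  -- unreachable: split(sep, 1) with sep present yields two pieces
    else (part, part)
  if PySem.Chars.strIsdigit pq.1 && PySem.Chars.strIsdigit pq.2 then
    match PySem.Int.ofChars? pq.1, PySem.Int.ofChars? pq.2 with
    | some lo, some hi =>
      if 1 ≤ lo ∧ lo ≤ hi ∧ hi ≤ 4094 then intervals ++ [(lo, hi)] else intervals
    | _, _ => intervals  -- unreachable: isdigit strings parse as int
  else intervals

-- body of B's merging sweep 'for lo, hi in intervals:' over state (result, last)
def pvSweep (st : List Int × Int) (p : Int × Int) : List Int × Int :=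
  let start := if p.1 > st.2 then p.1 else st.2 + 1
  (st.1 ++ PySem.List.pyRange start (p.2 + 1),
   if p.2 > st.2 then p.2 else st.2)

def expand_vlan_list_alt (value : Option String) : List Int :=
  match value with
  | none => []
  | some v =>
    if v.toList = [] then []
    else
      let cleaned := PySem.Chars.replace (PySem.Chars.replace (PySem.Chars.replace
        (PySem.Chars.replace (PySem.Chars.lower v.toList)
          "add".toList []) "vlan".toList []) "allowed".toList []) " ".toList []
      if cleaned = "all".toList ∨ cleaned = "none".toList then []
      else
        let intervals :=
          (PySem.Chars.splitOn cleaned [',']).foldl pvStepB []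
        let sortedIv := PySem.List.sorted intervals (fun p => p.1)
        (sortedIv.foldl pvSweep ([], 0)).1

-- ===== PRECONDITION & SPEC =====
def Spec_expand_vlan_list (value : Option String) (out : List Int) : Prop := out = expand_vlan_list_alt value
instance (value : Option String) (out : List Int) : Decidable (Spec_expand_vlan_list value out) := by unfold Spec_expand_vlan_list; infer_instance

-- ===== CLAIM (what is proved, stated in full; the proofs are below) =====
def Claim_equal_expand_vlan_list : Prop := ∀ (value : Option String), Dom_expand_vlan_list value → Spec_expand_vlan_list value (expand_vlan_list value)

-- ===== LEMMAS AND PROOFS =====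

-- the interval a single token contributes (proof-side characterisation of both loop bodies)
def pvIvOf (part : List Char) : Option (Int × Int) :=
  let pq : List Char × List Char :=
    if PySem.Chars.isIn ['-'] part then
      match PySem.Chars.splitOnMax part ['-'] 1 with
      | [loText, hiText] => (loText, hiText)
      | _ => (part, part)
    else (part, part)
  if PySem.Chars.strIsdigit pq.1 && PySem.Chars.strIsdigit pq.2 then
    match PySem.Int.ofChars? pq.1, PySem.Int.ofChars? pq.2 with
    | some lo, some hi =>
      if 1 ≤ lo ∧ lo ≤ hi ∧ hi ≤ 4094 then some (lo, hi) else none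
    | _, _ => none
  else none

-- a part containing '-' is not all-digits
lemma pvDash_not_digit {part : List Char} (h : PySem.Chars.isIn ['-'] part = true) :
    PySem.Chars.strIsdigit part = false := by
  have hmem : '-' ∈ part := by
    rcases (PySem.Chars.isIn_iff_infix ['-'] part).1 h with ⟨s, t, rfl⟩
    simp
  simp only [PySem.Chars.strIsdigit, Bool.and_eq_false_iff]
  right
  simp only [List.all_eq_false]
  exact ⟨'-', hmem, by decide⟩

lemma pvIvOf_valid {part : List Char} {p : Int × Int} (h : pvIvOf part = some p) :
    1 ≤ p.1 ∧ p.1 ≤ p.2 ∧ p.2 ≤ 4094 := by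
  unfold pvIvOf at h
  dsimp only at h
  repeat' split at h
  all_goals first
    | (injection h with h; subst h; assumption)
    | exact absurd h (by simp)

-- A's loop body, restated against pvIvOf
lemma pvStepA_eq (vlans : PySem.Set Int) (part : List Char) :
    pvStepA vlans part =
      match pvIvOf part with
      | none => vlans
      | some p => (PySem.List.pyRange p.1 (p.2 + 1)).foldl PySem.Set.add vlans := by
  unfold pvStepA pvIvOf
  by_cases hemp : part = []
  · subst hemp
    rfl
  · rw [if_neg hemp]
    by_cases hin : PySem.Chars.isIn ['-'] part = true
    · simp only [if_pos hin]
      rcases hsp : PySem.Chars.splitOnMax part ['-'] 1 with _ | ⟨a, _ | ⟨b, _ | t⟩⟩ <;>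
        dsimp only
      · simp [pvDash_not_digit hin]
      · simp [pvDash_not_digit hin]
      · by_cases hd : (PySem.Chars.strIsdigit a && PySem.Chars.strIsdigit b) = true
        · simp only [if_pos hd]
          rcases hx : PySem.Int.ofChars? a with _ | s <;>
            rcases hy : PySem.Int.ofChars? b with _ | e <;> (dsimp only; try rfl)
          by_cases hb : 1 ≤ s ∧ s ≤ e ∧ e ≤ 4094
          · simp [hb, PySem.Set.update]
          · simp [hb]
        · simp [hd]
      · simp [pvDash_not_digit hin]
    · simp only [if_neg hin, Bool.and_self]
      by_cases hd : PySem.Chars.strIsdigit part = true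
      · simp only [if_pos hd]
        rcases hpt : PySem.Int.ofChars? part with _ | v
        · rfl
        · dsimp only
          by_cases hb : 1 ≤ v ∧ v ≤ 4094
          · rw [if_pos hb, if_pos (show 1 ≤ v ∧ v ≤ v ∧ v ≤ 4094 by omega)]
            dsimp only
            rw [PySem.List.pyRange_one_cons (show v < v + 1 by omega)]
            have hnil : PySem.List.pyRange (v + 1) (v + 1) = [] := by
              rw [PySem.List.pyRange_of_pos _ _ one_pos]; simp
            rw [hnil, List.foldl_cons, List.foldl_nil]
          · rw [if_neg hb, if_neg (show ¬(1 ≤ v ∧ v ≤ v ∧ v ≤ 4094) by omega)]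
      · simp [hd]

-- B's loop body appends exactly pvIvOf's interval
lemma pvStepB_tail (intervals : List (Int × Int)) (l r : List Char) :
    (if (PySem.Chars.strIsdigit l && PySem.Chars.strIsdigit r) = true then
        match PySem.Int.ofChars? l, PySem.Int.ofChars? r with
        | some lo, some hi =>
          if 1 ≤ lo ∧ lo ≤ hi ∧ hi ≤ 4094 then intervals ++ [(lo, hi)] else intervals
        | _, _ => intervals
      else intervals) =
    intervals ++
      (if (PySem.Chars.strIsdigit l && PySem.Chars.strIsdigit r) = true then
          match PySem.Int.ofChars? l, PySem.Int.ofChars? r with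
          | some lo, some hi =>
            if 1 ≤ lo ∧ lo ≤ hi ∧ hi ≤ 4094 then some (lo, hi) else none
          | _, _ => none
        else none).toList := by
  by_cases hd : (PySem.Chars.strIsdigit l && PySem.Chars.strIsdigit r) = true
  · rw [if_pos hd, if_pos hd]
    rcases PySem.Int.ofChars? l with _ | lo <;>
      rcases PySem.Int.ofChars? r with _ | hi <;> dsimp only <;> try simp
    split <;> simp
  · rw [if_neg hd, if_neg hd]; simp

-- B's loop body appends exactly pvIvOf's interval
lemma pvStepB_eq (intervals : List (Int × Int)) (part : List Char) :
    pvStepB intervals part = intervals ++ (pvIvOf part).toList := by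
  unfold pvStepB pvIvOf
  by_cases hin : PySem.Chars.isIn ['-'] part = true
  · simp only [if_pos hin]
    rcases hsp : PySem.Chars.splitOnMax part ['-'] 1 with _ | ⟨a, _ | ⟨b, _ | t⟩⟩ <;>
      dsimp only <;> exact pvStepB_tail intervals _ _
  · simp only [if_neg hin]
    exact pvStepB_tail intervals part part

lemma pvMem_foldl_add (l : List Int) (s : PySem.Set Int) (x : Int) :
    x ∈ l.foldl PySem.Set.add s ↔ x ∈ s ∨ x ∈ l := by
  induction l generalizing s with
  | nil => simp
  | cons a t ih =>
    simp only [List.foldl_cons, ih, PySem.Set.mem_add, List.mem_cons]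
    tauto

lemma pvNodup_foldl_add (l : List Int) (s : PySem.Set Int) (h : s.Nodup) :
    (l.foldl PySem.Set.add s).Nodup := by
  induction l generalizing s with
  | nil => exact h
  | cons a t ih => exact ih _ (PySem.Set.nodup_add _ _ h)

lemma pvStepA_mem (vlans : PySem.Set Int) (part : List Char) (x : Int) :
    x ∈ pvStepA vlans part ↔
      x ∈ vlans ∨ ∃ p, pvIvOf part = some p ∧ p.1 ≤ x ∧ x ≤ p.2 := by
  rw [pvStepA_eq]
  rcases h : pvIvOf part with _ | p <;> dsimp only
  · simp
  · rw [pvMem_foldl_add]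
    simp only [PySem.List.mem_pyRange_one, Option.some.injEq]
    constructor
    · rintro (hx | ⟨h1, h2⟩)
      · exact Or.inl hx
      · exact Or.inr ⟨p, rfl, h1, by omega⟩
    · rintro (hx | ⟨q, rfl, h1, h2⟩)
      · exact Or.inl hx
      · exact Or.inr ⟨h1, by omega⟩

lemma pvStepA_nodup (vlans : PySem.Set Int) (part : List Char) (h : vlans.Nodup) :
    (pvStepA vlans part).Nodup := by
  rw [pvStepA_eq]
  rcases pvIvOf part with _ | p
  · exact h
  · exact pvNodup_foldl_add _ _ h

-- A's whole collection loop, characterised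
lemma pvFoldA_mem (parts : List (List Char)) (vlans : PySem.Set Int) (x : Int) :
    x ∈ parts.foldl pvStepA vlans ↔
      x ∈ vlans ∨ ∃ part ∈ parts, ∃ p, pvIvOf part = some p ∧ p.1 ≤ x ∧ x ≤ p.2 := by
  induction parts generalizing vlans with
  | nil => simp
  | cons a t ih =>
    simp only [List.foldl_cons, ih, pvStepA_mem, List.mem_cons]
    constructor
    · rintro ((h | h) | ⟨part, hpt, h⟩)
      · exact Or.inl h
      · exact Or.inr ⟨a, Or.inl rfl, h⟩
      · exact Or.inr ⟨part, Or.inr hpt, h⟩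
    · rintro (h | ⟨part, hpt | hpt, h⟩)
      · exact Or.inl (Or.inl h)
      · exact Or.inl (Or.inr (hpt ▸ h))
      · exact Or.inr ⟨part, hpt, h⟩

lemma pvFoldA_nodup (parts : List (List Char)) (vlans : PySem.Set Int) (h : vlans.Nodup) :
    (parts.foldl pvStepA vlans).Nodup := by
  induction parts generalizing vlans with
  | nil => exact h
  | cons a t ih => exact ih _ (pvStepA_nodup _ _ h)

-- B's whole collection loop: the intervals are exactly the pvIvOf values of the parts
lemma pvFoldB_mem (parts : List (List Char)) (p : Int × Int) :
    p ∈ parts.foldl pvStepB [] ↔ ∃ part ∈ parts, pvIvOf part = some p := by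
  have h1 : parts.foldl pvStepB [] =
      parts.foldl (fun acc part => acc ++ (pvIvOf part).toList) [] :=
    PySem.List.foldl_congr_mem parts _ _ []
      (fun acc part _ => pvStepB_eq acc part)
  rw [h1, PySem.List.foldl_append_eq_flatMap]
  simp [List.mem_flatMap]

lemma pvRange_pairwise (a b : Int) : List.Pairwise (· < ·) (PySem.List.pyRange a b) := by
  rw [PySem.List.pyRange_of_pos a b one_pos]
  refine List.Pairwise.map _ ?_ (List.pairwise_lt_range)
  intro x y hxy
  omega

-- the merging sweep over start-sorted valid intervals emits their union, strictly increasing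
lemma pvSweep_spec (rest : List (Int × Int)) :
    ∀ (res : List Int) (last : Int),
      (∀ p ∈ rest, 1 ≤ p.1 ∧ p.1 ≤ p.2) →
      rest.Pairwise (fun p q => p.1 ≤ q.1) →
      List.Pairwise (· < ·) res →
      (∀ x ∈ res, x ≤ last) →
      (∀ p ∈ rest, ∀ x, p.1 ≤ x → x ≤ last → x ≤ p.2 → x ∈ res) →
      List.Pairwise (· < ·) (rest.foldl pvSweep (res, last)).1 ∧
      (∀ x, x ∈ (rest.foldl pvSweep (res, last)).1 ↔
        x ∈ res ∨ ∃ p ∈ rest, p.1 ≤ x ∧ x ≤ p.2) := by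
  induction rest with
  | nil => intro res last _ _ hps _ _; exact ⟨hps, by simp⟩
  | cons q t ih =>
    intro res last hv hsort hps hle hcov
    obtain ⟨hq1, hq2⟩ := hv q List.mem_cons_self
    simp only [List.foldl_cons, pvSweep]
    set start := if q.1 > last then q.1 else last + 1 with hstartdef
    have hstart1 : last + 1 ≤ start := by rw [hstartdef]; split <;> omega
    have hstart2 : q.1 ≤ start := by rw [hstartdef]; split <;> omega
    set last' := if q.2 > last then q.2 else last with hl'
    have hlast'ated : last ≤ last' ∧ q.2 ≤ last' ∧ (last' = q.2 ∨ last' = last) := by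
      rw [hl']; split <;> omega
    set res' := res ++ PySem.List.pyRange start (q.2 + 1) with hres'
    have hmemr : ∀ x, x ∈ res' ↔ x ∈ res ∨ (start ≤ x ∧ x ≤ q.2) := by
      intro x
      simp only [hres', List.mem_append, PySem.List.mem_pyRange_one]
      constructor
      · rintro (h | ⟨h1, h2⟩)
        · exact Or.inl h
        · exact Or.inr ⟨h1, by omega⟩
      · rintro (h | ⟨h1, h2⟩)
        · exact Or.inl h
        · exact Or.inr ⟨h1, by omega⟩
    have hps' : List.Pairwise (· < ·) res' := by
      rw [hres']
      refine List.pairwise_append.2 ⟨hps, pvRange_pairwise _ _, ?_⟩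
      intro a ha b hb
      have hb' := PySem.List.mem_pyRange_one.1 hb
      have := hle a ha
      omega
    have hle' : ∀ x ∈ res', x ≤ last' := by
      intro x hx
      rcases (hmemr x).1 hx with h | ⟨h1, h2⟩
      · have := hle x h; omega
      · omega
    have hcov' : ∀ p ∈ t, ∀ x, p.1 ≤ x → x ≤ last' → x ≤ p.2 → x ∈ res' := by
      intro p hp x h1 h2 h3
      have hqp : q.1 ≤ p.1 := (List.pairwise_cons.1 hsort).1 p hp
      by_cases hxl : x ≤ last
      · exact (hmemr x).2 (Or.inl (hcov p (List.mem_cons_of_mem _ hp) x h1 hxl h3))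
      · exact (hmemr x).2 (Or.inr ⟨by omega, by omega⟩)
    obtain ⟨hp1, hp2⟩ := ih res' last'
      (fun p hp => hv p (List.mem_cons_of_mem _ hp))
      (List.pairwise_cons.1 hsort).2 hps' hle' hcov'
    refine ⟨hp1, fun x => ?_⟩
    rw [hp2 x, hmemr x]
    constructor
    · rintro ((h | ⟨h1, h2⟩) | ⟨p, hp, h⟩)
      · exact Or.inl h
      · exact Or.inr ⟨q, List.mem_cons_self, by omega, h2⟩
      · exact Or.inr ⟨p, List.mem_cons_of_mem _ hp, h⟩
    · rintro (h | ⟨p, hp, h1, h2⟩)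
      · exact Or.inl (Or.inl h)
      · rcases List.mem_cons.1 hp with rfl | hp'
        · by_cases hxs : start ≤ x
          · exact Or.inl (Or.inr ⟨hxs, h2⟩)
          · have hxl : x ≤ last := by omega
            exact Or.inl (Or.inl (hcov p List.mem_cons_self x h1 hxl h2))
        · exact Or.inr ⟨p, hp', h1, h2⟩

-- ===== VERDICT (by name: the statement is the Claim_ definition above) =====
theorem expand_vlan_list_spec : Claim_equal_expand_vlan_list := by
  unfold Claim_equal_expand_vlan_list
  intro value _
  unfold Spec_expand_vlan_list
  cases value with
  | none => rfl
  | some v =>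
    simp only [expand_vlan_list, expand_vlan_list_alt]
    by_cases h0 : v.toList = []
    · rw [if_pos h0, if_pos h0]
    · rw [if_neg h0, if_neg h0]
      generalize PySem.Chars.replace (PySem.Chars.replace (PySem.Chars.replace
        (PySem.Chars.replace (PySem.Chars.lower v.toList)
          "add".toList []) "vlan".toList []) "allowed".toList []) " ".toList [] = cl
      by_cases hg : cl = "all".toList ∨ cl = "none".toList
      · rw [if_pos hg, if_pos hg]
      · rw [if_neg hg, if_neg hg]
        set parts := PySem.Chars.splitOn cl [','] with hparts
        set sortedIv := PySem.List.sorted (parts.foldl pvStepB []) (fun p => p.1)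
          with hsiv
        have hivmem : ∀ p, p ∈ sortedIv ↔ ∃ part ∈ parts, pvIvOf part = some p := by
          intro p
          rw [hsiv, PySem.List.mem_sorted, pvFoldB_mem]
        have hvalid : ∀ p ∈ sortedIv, 1 ≤ p.1 ∧ p.1 ≤ p.2 := by
          intro p hp
          obtain ⟨part, _, hiv⟩ := (hivmem p).1 hp
          have := pvIvOf_valid hiv
          exact ⟨this.1, this.2.1⟩
        have hsorted : sortedIv.Pairwise (fun p q => p.1 ≤ q.1) :=
          PySem.List.sorted_pairwise _ _
        obtain ⟨hBps, hBmem⟩ := pvSweep_spec sortedIv [] 0 hvalid hsorted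
          List.Pairwise.nil (by simp)
          (fun p hp x h1 h2 _ => by have := hvalid p hp; omega)
        apply PySem.List.sorted_eq_of_perm_of_pairwise_lt
        · have hnodupB : (sortedIv.foldl pvSweep ([], 0)).1.Nodup :=
            hBps.imp ne_of_lt
          have hnodupA : (parts.foldl pvStepA PySem.Set.empty).Nodup :=
            pvFoldA_nodup parts _ List.nodup_nil
          refine (List.perm_ext_iff_of_nodup hnodupB hnodupA).2 ?_
          intro x
          rw [hBmem x, pvFoldA_mem]
          constructor
          · intro hB
            rcases hB with hfalse | hB'
            · exact absurd hfalse List.not_mem_nil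
            · obtain ⟨p, hp, h1, h2⟩ := hB'
              obtain ⟨part, hpt, hiv⟩ := (hivmem p).1 hp
              exact Or.inr ⟨part, hpt, p, hiv, h1, h2⟩
          · intro hA
            rcases hA with hfalse | hA'
            · exact absurd hfalse (by simp [PySem.Set.empty])
            · obtain ⟨part, hpt, p, hiv, h1, h2⟩ := hA'
              exact Or.inr ⟨p, (hivmem p).2 ⟨part, hpt, hiv⟩, h1, h2⟩
        · exact hBps
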